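-- pv_equiv track=rewrite | github.com/aedile/conclave | tests/unit/test_docker_image_pinning.py | _from_line_is_exempt
-- ===== SOURCE A (Python) =====
-- _DIGEST_EXEMPTION_MARKER = "TODO(P87)"
--
-- def _from_line_is_exempt(dockerfile_text: str, from_line: str) -> bool:
--     """Return True if a FROM line is temporarily exempt from SHA-256 pinning.
--
--     A FROM line is exempt if the TODO(P87) exemption marker appears in the
--     comment block immediately preceding it in the Dockerfile.  The marker must
--     be on a comment line (starting with #) within the 5 lines above the FROM
--     directive.  This prevents silently inheriting an exemption from a distant
--     unrelated comment block.
--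
--     Args:
--         dockerfile_text: Full text of the Dockerfile.
--         from_line: The stripped FROM directive line to check.
--
--     Returns:
--         True if the FROM line carries a valid exemption marker.
--     """
--     all_lines = dockerfile_text.splitlines()
--     for i, line in enumerate(all_lines):
--         if line.strip() == from_line:
--             # Look back up to 5 lines for a comment containing the marker
--             start = max(0, i - 5)
--             preceding = all_lines[start:i]
--             for comment_line in reversed(preceding):
--                 stripped = comment_line.strip()
--                 if stripped.startswith("#") and _DIGEST_EXEMPTION_MARKER in stripped:
--                     return True
--     return False
-- ===== SOURCE B (Python) =====
-- _DIGEST_EXEMPTION_MARKER = "TODO(P87)"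
--
-- def _from_line_is_exempt(dockerfile_text: str, from_line: str) -> bool:
--     # Single streaming pass with O(1) state: remember only the index of the
--     # most recent marker comment seen so far; a FROM line is exempt exactly
--     # when that last marker lies within the 5 preceding lines.
--     last_marker = -6
--     for i, line in enumerate(dockerfile_text.splitlines()):
--         stripped = line.strip()
--         if stripped == from_line and i - last_marker <= 5:
--             return True
--         if stripped.startswith("#") and _DIGEST_EXEMPTION_MARKER in stripped:
--             last_marker = i
--     return False
-- ===== Notes on version B (the rewrite author's own statement) =====
-- stated objective: alternative
-- what changed: B is a single streaming pass with O(1) extra state: it tracks only the index of the most recent marker comment and answers each FROM-line match by comparing distance to that index (<=5), instead of A's per-FROM-line look-back slice scanned in reverse.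
import Mathlib
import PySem

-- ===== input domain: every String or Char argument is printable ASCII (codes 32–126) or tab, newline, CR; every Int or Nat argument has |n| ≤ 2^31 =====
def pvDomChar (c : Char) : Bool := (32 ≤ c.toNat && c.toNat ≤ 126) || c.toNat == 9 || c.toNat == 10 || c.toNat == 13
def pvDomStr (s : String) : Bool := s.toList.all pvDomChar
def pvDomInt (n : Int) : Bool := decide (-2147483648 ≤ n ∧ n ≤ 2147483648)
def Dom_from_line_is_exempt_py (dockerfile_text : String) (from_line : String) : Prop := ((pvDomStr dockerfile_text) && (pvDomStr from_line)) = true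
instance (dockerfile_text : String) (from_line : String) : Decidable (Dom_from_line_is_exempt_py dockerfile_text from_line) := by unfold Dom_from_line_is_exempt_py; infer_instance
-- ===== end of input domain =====

-- B replaces A's per-FROM-line look-back slicing by a single streaming pass that keeps only
-- the index of the most recent marker comment — an alternative O(1)-state algorithm.


-- ===== PORT A =====
-- is a stripped line a marker comment? (stripped.startswith("#") and "TODO(P87)" in stripped)
def pvIsMarker (stripped : String) : Bool :=
  PySem.Str.startswith stripped "#" && PySem.Str.isIn "TODO(P87)" stripped

-- A's outer for-loop with early return, over the enumerated lines
def pvLoopA (all_lines : List String) (from_line : String) : List (Int × String) → Bool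
  | [] => false
  | (i, line) :: rest =>
    if PySem.Str.strip line == from_line then
      let start := max 0 (i - 5)
      let preceding := PySem.List.slice all_lines (some start) (some i)
      -- inner for-loop over reversed(preceding) with early return True
      if preceding.reverse.any (fun comment_line => pvIsMarker (PySem.Str.strip comment_line)) then
        true
      else
        pvLoopA all_lines from_line rest
    else
      pvLoopA all_lines from_line rest

def from_line_is_exempt_py (dockerfile_text : String) (from_line : String) : Bool :=
  let all_lines := PySem.Str.splitlines dockerfile_text
  pvLoopA all_lines from_line (PySem.List.enumerate all_lines 0)

-- ===== PORT B =====
-- B's single for-loop: 'last' carries last_marker; early return True on a matching FROM line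
-- whose distance to the last marker comment is at most 5
def pvLoopB (from_line : String) : Int → List (Int × String) → Bool
  | _, [] => false
  | last, (i, line) :: rest =>
    let stripped := PySem.Str.strip line
    if stripped == from_line && decide (i - last ≤ 5) then
      true
    else if pvIsMarker stripped then
      pvLoopB from_line i rest
    else
      pvLoopB from_line last rest

def from_line_is_exempt_py_alt (dockerfile_text : String) (from_line : String) : Bool :=
  pvLoopB from_line (-6) (PySem.List.enumerate (PySem.Str.splitlines dockerfile_text) 0)

-- ===== PRECONDITION & SPEC =====
def Spec_from_line_is_exempt_py (dockerfile_text : String) (from_line : String) (out : Bool) : Prop := out = from_line_is_exempt_py_alt dockerfile_text from_line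
instance (dockerfile_text : String) (from_line : String) (out : Bool) : Decidable (Spec_from_line_is_exempt_py dockerfile_text from_line out) := by unfold Spec_from_line_is_exempt_py; infer_instance

-- ===== CLAIM (what is proved, stated in full; the proofs are below) =====
def Claim_equal_from_line_is_exempt_py : Prop := ∀ (dockerfile_text : String) (from_line : String), Dom_from_line_is_exempt_py dockerfile_text from_line → Spec_from_line_is_exempt_py dockerfile_text from_line (from_line_is_exempt_py dockerfile_text from_line)

-- ===== LEMMAS AND PROOFS =====

-- A's early-return loop is the 'any' of the per-line look-back test
theorem pvLoopA_eq_any (all_lines : List String) (from_line : String) (l : List (Int × String)) :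
    pvLoopA all_lines from_line l = l.any (fun p =>
      PySem.Str.strip p.2 == from_line &&
      (PySem.List.slice all_lines (some (max 0 (p.1 - 5))) (some p.1)).reverse.any
        (fun cl => pvIsMarker (PySem.Str.strip cl))) := by
  induction l with
  | nil => rfl
  | cons p rest ih =>
    obtain ⟨i, line⟩ := p
    simp only [pvLoopA, List.any_cons, ih]
    by_cases h : (PySem.Str.strip line == from_line) = true
    · simp only [h, if_true, Bool.true_and]
      split_ifs with hin <;> simp [hin]
    · simp [h]

-- the look-back window test, characterised: some marker comment at an index m with k-5 ≤ m < k
theorem window_iff (lines : List String) (k : Nat) :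
    ((PySem.List.slice lines (some (max 0 ((k : Int) - 5))) (some (k : Int))).reverse.any
        (fun cl => pvIsMarker (PySem.Str.strip cl))) = true
    ↔ ∃ m : Nat, ∃ hm : m < lines.length,
        k ≤ m + 5 ∧ m < k ∧ pvIsMarker (PySem.Str.strip lines[m]) = true := by
  have hmax : max 0 ((k : Int) - 5) = ((k - 5 : ℕ) : Int) := by omega
  rw [hmax, PySem.List.slice_natCast, List.any_reverse]
  simp only [List.any_eq_true]
  constructor
  · rintro ⟨x, hx, hfx⟩
    rw [List.mem_iff_getElem] at hx
    obtain ⟨i, hi, hxi⟩ := hx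
    simp only [List.length_take, List.length_drop] at hi
    refine ⟨k - 5 + i, by omega, by omega, by omega, ?_⟩
    have hx' : x = lines[k - 5 + i]'(by omega) := by
      rw [← hxi]; simp [List.getElem_take, List.getElem_drop]
    rwa [← hx']
  · rintro ⟨m, hm, h1, h2, hf⟩
    refine ⟨lines[m], ?_, hf⟩
    rw [List.mem_iff_getElem]
    refine ⟨m - (k - 5), ?_, ?_⟩
    · simp only [List.length_take, List.length_drop]; omega
    · have hsum : k - 5 + (m - (k - 5)) = m := by omega
      simp only [List.getElem_take, List.getElem_drop, hsum]

-- main invariant: running B's loop on the suffix starting at index k, with 'last' the index of the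
-- last marker comment before k (or -6 if none), computes the 'any' of A's per-line look-back test
theorem pvLoopB_eq_any (lines : List String) (fl : String) :
    ∀ (ls : List String) (k : Nat) (last : Int),
      lines.drop k = ls →
      (∀ j : Nat, ∀ hj : j < lines.length, j < k →
          pvIsMarker (PySem.Str.strip lines[j]) = true → (j : Int) ≤ last) →
      (last = -6 ∨ ∃ j : Nat, ∃ hj : j < lines.length,
          (j : Int) = last ∧ j < k ∧ pvIsMarker (PySem.Str.strip lines[j]) = true) →
      pvLoopB fl last (PySem.List.enumerate ls (k : Int)) =
        (PySem.List.enumerate ls (k : Int)).any (fun p =>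
          PySem.Str.strip p.2 == fl &&
          (PySem.List.slice lines (some (max 0 (p.1 - 5))) (some p.1)).reverse.any
            (fun cl => pvIsMarker (PySem.Str.strip cl))) := by
  intro ls
  induction ls with
  | nil => intro k last _ _ _; simp [PySem.List.enumerate_nil, pvLoopB]
  | cons x xs ih =>
    intro k last hdrop hub hat
    have hklen : k < lines.length := by
      by_contra h
      rw [List.drop_eq_nil_of_le (by omega)] at hdrop
      exact (List.cons_ne_nil x xs) hdrop.symm
    have hxk : lines[k] = x := by
      have h0 : (List.drop k lines)[0]'(by rw [hdrop]; exact Nat.succ_pos _) = x := by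
        simp [hdrop]
      rw [List.getElem_drop] at h0
      simpa using h0
    rw [PySem.List.enumerate_cons, List.any_cons]
    simp only [pvLoopB]
    -- compare the head tests
    have hcond : (decide ((k : Int) - last ≤ 5)) =
        ((PySem.List.slice lines (some (max 0 ((k : Int) - 5))) (some (k : Int))).reverse.any
          (fun cl => pvIsMarker (PySem.Str.strip cl))) := by
      rw [Bool.eq_iff_iff, decide_eq_true_iff, window_iff lines k]
      constructor
      · intro hle
        rcases hat with h6 | ⟨j, hj, hjl, hjk, hjm⟩
        · omega
        · exact ⟨j, hj, by omega, hjk, hjm⟩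
      · rintro ⟨m, hm, h1, h2, hf⟩
        have := hub m hm h2 hf
        omega
    have htail : ∀ last' : Int,
        ((pvIsMarker (PySem.Str.strip x) = true ∧ last' = (k : Int)) ∨
         (pvIsMarker (PySem.Str.strip x) = false ∧ last' = last)) →
        pvLoopB fl last' (PySem.List.enumerate xs ((k : Int) + 1)) =
          (PySem.List.enumerate xs ((k : Int) + 1)).any (fun p =>
            PySem.Str.strip p.2 == fl &&
            (PySem.List.slice lines (some (max 0 (p.1 - 5))) (some p.1)).reverse.any
              (fun cl => pvIsMarker (PySem.Str.strip cl))) := by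
      intro last' hcase
      have hk1 : ((k : Int) + 1) = ((k + 1 : Nat) : Int) := by push_cast; ring
      rw [hk1]
      apply ih (k + 1) last'
      · have : lines.drop (k + 1) = (lines.drop k).tail := by
          rw [List.tail_drop]
        rw [this, hdrop]; rfl
      · intro j hj hjk hjm
        rcases Nat.lt_or_ge j k with hlt | hge
        · rcases hcase with ⟨_, rfl⟩ | ⟨_, rfl⟩
          · have := hub j hj hlt hjm; omega
          · exact hub j hj hlt hjm
        · have hjeq : j = k := by omega
          subst hjeq
          rcases hcase with ⟨_, rfl⟩ | ⟨hf, _⟩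
          · omega
          · rw [hxk] at hjm; rw [hjm] at hf; cases hf
      · rcases hcase with ⟨hf, rfl⟩ | ⟨_, rfl⟩
        · exact Or.inr ⟨k, hklen, rfl, by omega, by rwa [hxk]⟩
        · rcases hat with h6 | ⟨j, hj, hjl, hjk, hjm⟩
          · exact Or.inl h6
          · exact Or.inr ⟨j, hj, hjl, by omega, hjm⟩
    by_cases hfl : (PySem.Str.strip x == fl) = true
    · simp only [hfl, Bool.true_and, hcond]
      rcases hslice : ((PySem.List.slice lines (some (max 0 ((k : Int) - 5))) (some (k : Int))).reverse.any
          (fun cl => pvIsMarker (PySem.Str.strip cl))) with _ | _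
      · simp only [Bool.false_or]
        rw [if_neg (by simp)]
        rcases hmk : pvIsMarker (PySem.Str.strip x) with _ | _
        · rw [if_neg (by simp)]
          exact htail last (Or.inr ⟨hmk, rfl⟩)
        · rw [if_pos rfl]
          exact htail (k : Int) (Or.inl ⟨hmk, rfl⟩)
      · simp
    · simp only [Bool.not_eq_true] at hfl
      simp only [hfl, Bool.false_and, Bool.false_or]
      rw [if_neg (by simp)]
      rcases hmk : pvIsMarker (PySem.Str.strip x) with _ | _
      · rw [if_neg (by simp)]
        exact htail last (Or.inr ⟨hmk, rfl⟩)
      · rw [if_pos rfl]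
        exact htail (k : Int) (Or.inl ⟨hmk, rfl⟩)

-- ===== VERDICT (by name: the statement is the Claim_ definition above) =====
theorem from_line_is_exempt_py_spec : Claim_equal_from_line_is_exempt_py := by
  intro t fl _
  unfold Spec_from_line_is_exempt_py from_line_is_exempt_py from_line_is_exempt_py_alt
  simp only
  rw [pvLoopA_eq_any]
  have h0 : ((0 : Nat) : Int) = (0 : Int) := rfl
  rw [← h0, pvLoopB_eq_any (PySem.Str.splitlines t) fl (PySem.Str.splitlines t) 0 (-6) rfl
      (by intro j _ hj _; omega) (Or.inl rfl)]
  simp
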